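-- pv_equiv track=rewrite | github.com/crocs-muni/DiSSECT | curve_analyzer/tests/a05/a05.py | select_a05_results
-- ===== SOURCE A (Python) =====
-- def select_a05_results(curve_results):
--     keys = ['least', 'full', 'relative']
--     selected_results = []
--     for key in keys:
--         selected_key = []
--         for x in curve_results:
--             selected_key.append(x[key])
--         selected_results.append(selected_key)
--     return selected_results
-- ===== SOURCE B (Python) =====
-- def select_a05_results(curve_results):
--     least_list, full_list, relative_list = [], [], []
--     for x in curve_results:
--         least_list.append(x['least'])
--         full_list.append(x['full'])
--         relative_list.append(x['relative'])
--     return [least_list, full_list, relative_list]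
-- ===== Notes on version B (the rewrite author's own statement) =====
-- stated objective: simpler
-- what changed: One element-major pass appending each dict's three values to three accumulator lists, instead of A's three key-major scans over the whole input.
-- outside the precondition, e.g. on select_a05_results([{'least': 1}]): A raises KeyError, B raises KeyError
import Mathlib
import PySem

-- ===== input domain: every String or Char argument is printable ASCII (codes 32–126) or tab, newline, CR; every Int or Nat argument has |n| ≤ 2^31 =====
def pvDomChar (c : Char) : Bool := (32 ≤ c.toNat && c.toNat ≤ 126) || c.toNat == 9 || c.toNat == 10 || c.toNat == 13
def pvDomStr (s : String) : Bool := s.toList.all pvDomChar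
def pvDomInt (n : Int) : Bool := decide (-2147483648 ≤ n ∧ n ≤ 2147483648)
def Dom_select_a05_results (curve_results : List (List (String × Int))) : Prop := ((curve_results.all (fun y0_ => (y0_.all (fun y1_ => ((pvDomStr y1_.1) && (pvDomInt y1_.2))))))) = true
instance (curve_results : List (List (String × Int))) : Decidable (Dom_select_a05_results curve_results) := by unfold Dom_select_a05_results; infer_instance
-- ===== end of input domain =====

-- B makes one element-major pass appending each dict's three values to three accumulator
-- lists, instead of A's three key-major scans over the whole input (objective: simpler).


-- x[key] on a dict; Pre_ guarantees the key is present, so the default 0 is never used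
def pvGetKey (x : List (String × Int)) (key : String) : Int :=
  PySem.Dict.getD (PySem.Dict.ofList x) key 0

-- ===== PORT A =====
def select_a05_results (curve_results : List (List (String × Int))) : List (List Int) :=
  let keys := ["least", "full", "relative"]
  keys.foldl (fun selected_results key =>
    selected_results ++
      [curve_results.foldl (fun selected_key x => selected_key ++ [pvGetKey x key]) []]) []

-- ===== PORT B =====
def select_a05_results_alt (curve_results : List (List (String × Int))) : List (List Int) :=
  let acc := curve_results.foldl
    (fun (acc : List Int × List Int × List Int) x =>
      (acc.1 ++ [pvGetKey x "least"],
       acc.2.1 ++ [pvGetKey x "full"],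
       acc.2.2 ++ [pvGetKey x "relative"])) ([], [], [])
  [acc.1, acc.2.1, acc.2.2]

-- ===== PRECONDITION & SPEC =====
-- Pre_ excludes inputs where some dict lacks one of the three keys: there A raises KeyError.
def Pre_select_a05_results (curve_results : List (List (String × Int))) : Prop :=
  (curve_results.all (fun x =>
    x.any (fun p => p.1 == "least") &&
    x.any (fun p => p.1 == "full") &&
    x.any (fun p => p.1 == "relative"))) = true
instance (curve_results : List (List (String × Int))) : Decidable (Pre_select_a05_results curve_results) := by unfold Pre_select_a05_results; infer_instance

def pvWitness_select_a05_results : (List (List (String × Int))) :=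
  [[("least", 1), ("full", 2), ("relative", 3)]]

def Spec_select_a05_results (curve_results : List (List (String × Int))) (out : List (List Int)) : Prop := out = select_a05_results_alt curve_results
instance (curve_results : List (List (String × Int))) (out : List (List Int)) : Decidable (Spec_select_a05_results curve_results out) := by unfold Spec_select_a05_results; infer_instance

-- ===== CLAIM (what is proved, stated in full; the proofs are below) =====
def Claim_equal_select_a05_results : Prop := ∀ (curve_results : List (List (String × Int))), Dom_select_a05_results curve_results → Pre_select_a05_results curve_results → Spec_select_a05_results curve_results (select_a05_results curve_results)

-- ===== LEMMAS AND PROOFS =====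
theorem foldl_append_map (g : List (String × Int) → Int) :
    ∀ (cr : List (List (String × Int))) (acc : List Int),
      cr.foldl (fun sk x => sk ++ [g x]) acc = acc ++ cr.map g := by
  intro cr
  induction cr with
  | nil => simp
  | cons h t ih => intro acc; simp [List.foldl, ih]

theorem foldl_triple (g1 g2 g3 : List (String × Int) → Int) :
    ∀ (cr : List (List (String × Int))) (a b c : List Int),
      cr.foldl (fun (acc : List Int × List Int × List Int) x =>
        (acc.1 ++ [g1 x], acc.2.1 ++ [g2 x], acc.2.2 ++ [g3 x])) (a, b, c)
      = (a ++ cr.map g1, b ++ cr.map g2, c ++ cr.map g3) := by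
  intro cr
  induction cr with
  | nil => simp
  | cons h t ih => intro a b c; simp [List.foldl, ih]

-- ===== VERDICT (by name: the statement is the Claim_ definition above) =====
theorem select_a05_results_spec : Claim_equal_select_a05_results := by
  intro cr _ _
  unfold Spec_select_a05_results select_a05_results select_a05_results_alt
  rw [foldl_triple]
  simp only [List.foldl, List.nil_append]
  rw [foldl_append_map, foldl_append_map, foldl_append_map]
  simp
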